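-- pv_equiv track=rewrite | github.com/tt-n-walters/thebridge-week1 | login_system.py | process_usernames
-- ===== SOURCE A (Python) =====
-- def process_usernames(lines):
--     usernames = []
--     passwords = []
--     for counter in range(len(lines)):
--         line = lines[counter]
--
--         if counter % 2 == 0:       # username
--             usernames.append(line)
--         else:                      # password
--             passwords.append(line)
--     return usernames, passwords
-- ===== SOURCE B (Python) =====
-- def process_usernames(lines):
--     return lines[::2], lines[1::2]
-- ===== Notes on version B (the rewrite author's own statement) =====
-- stated objective: idiomatic
-- what changed: Replaces the indexed loop with parity branches by two strided slices lines[::2] and lines[1::2].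
import Mathlib
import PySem

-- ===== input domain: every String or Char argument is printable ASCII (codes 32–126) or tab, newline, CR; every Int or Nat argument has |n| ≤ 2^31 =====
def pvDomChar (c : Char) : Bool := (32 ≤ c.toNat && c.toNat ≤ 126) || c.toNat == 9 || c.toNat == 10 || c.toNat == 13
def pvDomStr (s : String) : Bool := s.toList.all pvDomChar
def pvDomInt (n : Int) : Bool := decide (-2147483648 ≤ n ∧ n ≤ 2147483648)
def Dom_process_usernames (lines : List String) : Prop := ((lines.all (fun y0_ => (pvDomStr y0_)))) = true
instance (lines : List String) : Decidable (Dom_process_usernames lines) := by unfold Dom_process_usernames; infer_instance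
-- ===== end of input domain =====

-- B replaces A's indexed loop with parity branches by two strided slices (idiomatic; same cost).

-- ===== PORT A =====
def process_usernames (lines : List String) : List String × List String :=
  let usernames : List String := []
  let passwords : List String := []
  let st := (PySem.List.pyRange 0 lines.length 1).foldl
    (fun (acc : List String × List String) counter =>
      let line := PySem.List.pyGetD lines counter ""   -- lines[counter]; counter is always in range
      if PySem.Int.mod counter 2 == 0 then (acc.1 ++ [line], acc.2)
      else (acc.1, acc.2 ++ [line]))
    (usernames, passwords)
  (st.1, st.2)

-- ===== PORT B =====
def process_usernames_alt (lines : List String) : List String × List String :=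
  ((PySem.List.slice? lines none none 2).getD [],      -- lines[::2]; step ≠ 0, so always some
   (PySem.List.slice? lines (some 1) none 2).getD [])  -- lines[1::2]

-- ===== PRECONDITION & SPEC =====
def Spec_process_usernames (lines : List String) (out : List String × List String) : Prop := out = process_usernames_alt lines
instance (lines : List String) (out : List String × List String) : Decidable (Spec_process_usernames lines out) := by unfold Spec_process_usernames; infer_instance

-- ===== CLAIM (what is proved, stated in full; the proofs are below) =====
def Claim_equal_process_usernames : Prop := ∀ (lines : List String), Dom_process_usernames lines → Spec_process_usernames lines (process_usernames lines)

-- ===== LEMMAS AND PROOFS =====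

/-- Every other element of a list, starting at the head. -/
def everyOther {α : Type} : List α → List α
  | [] => []
  | [x] => [x]
  | x :: _ :: t => x :: everyOther t

@[simp] theorem everyOther_cons_drop {α : Type} (x : α) (t : List α) :
    everyOther (x :: t) = x :: everyOther (t.drop 1) := by
  cases t; simp [everyOther]; simp [everyOther]

theorem filterMap_stride2 {α : Type} (xs : List α) :
    List.filterMap (fun (k : Nat) => xs[(2 * (k : Int)).toNat]?) (List.range ((xs.length + 1) / 2)) = everyOther xs := by
  induction xs using everyOther.induct with
  | case1 => simp [everyOther]
  | case2 x => simp [everyOther, List.range_one]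
  | case3 x y t ih =>
    have hc : ((x :: y :: t).length + 1) / 2 = (t.length + 1) / 2 + 1 := by
      simp only [List.length_cons]; omega
    rw [hc, List.range_succ_eq_map, List.filterMap_cons, List.filterMap_map]
    have hf : ((fun (k : Nat) => (x :: y :: t)[(2 * (k : Int)).toNat]?) ∘ Nat.succ)
        = fun (k : Nat) => t[(2 * (k : Int)).toNat]? := by
      funext k
      have h2 : (2 * ((k : Int) + 1)).toNat = (2 * (k : Int)).toNat + 2 := by omega
      simp only [Function.comp_apply, Nat.succ_eq_add_one]
      push_cast
      rw [h2]
      simp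
    rw [hf]
    simp [everyOther, ih]

/-- The strided-slice primitive with step 2 from the start is `everyOther`. -/
theorem slice?_two {α : Type} (xs : List α) :
    PySem.List.slice? xs none none 2 = some (everyOther xs) := by
  unfold PySem.List.slice? PySem.List.sliceIndices
  simp only [if_neg (by norm_num : ¬ (2:Int) = 0)]
  norm_num
  have hc : (if 0 < xs.length then (((xs.length : Int) + 2 - 1) / 2).toNat else 0)
      = (xs.length + 1) / 2 := by
    split <;> omega
  rw [hc]
  exact filterMap_stride2 xs

/-- The strided slice `xs[1::2]` is `everyOther` of the tail. -/
theorem slice?_one_two {α : Type} (xs : List α) :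
    PySem.List.slice? xs (some 1) none 2 = some (everyOther (xs.drop 1)) := by
  cases xs with
  | nil =>
    simp [PySem.List.slice?, PySem.List.sliceIndices, everyOther]
  | cons x t =>
    have h := filterMap_stride2 t
    unfold PySem.List.slice? PySem.List.sliceIndices
    simp only [if_neg (by norm_num : ¬ (2:Int) = 0)]
    norm_num
    have hc : (if 0 < t.length then (((t.length : Int) + 2 - 1) / 2).toNat else 0)
        = (t.length + 1) / 2 := by
      split <;> omega
    rw [hc, ← h]
    congr 1
    funext k
    have hk : (1 + 2 * (k : Int)).toNat = (2 * (k : Int)).toNat + 1 := by omega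
    rw [hk]
    simp

/-- The characterisation of A's fold over `enumerate`, generalising the start index. -/
theorem foldA_enumerate {α : Type} (xs : List α) :
    ∀ (s : Int) (u p : List α), 0 ≤ s →
    (PySem.List.enumerate xs s).foldl
      (fun (acc : List α × List α) jl =>
        if PySem.Int.mod jl.1 2 == 0 then (acc.1 ++ [jl.2], acc.2) else (acc.1, acc.2 ++ [jl.2]))
      (u, p)
    = if PySem.Int.mod s 2 == 0 then (u ++ everyOther xs, p ++ everyOther (xs.drop 1))
      else (u ++ everyOther (xs.drop 1), p ++ everyOther xs) := by
  induction xs with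
  | nil =>
    intro s u p hs
    simp only [PySem.List.enumerate_nil, List.foldl_nil]
    split <;> simp [everyOther]
  | cons x t ih =>
    intro s u p hs
    rw [PySem.List.enumerate_cons, List.foldl_cons]
    by_cases h : PySem.Int.mod s 2 = 0
    · have h1 : PySem.Int.mod (s + 1) 2 = 1 := by
        unfold PySem.Int.mod at h ⊢
        rw [Int.fmod_eq_emod] at *; omega
      have hb : (PySem.Int.mod s 2 == 0) = true := beq_iff_eq.mpr h
      have h1b : (PySem.Int.mod (s + 1) 2 == 0) = false :=
        beq_eq_false_iff_ne.mpr (by rw [h1]; norm_num)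
      rw [hb, if_pos rfl, ih (s + 1) _ _ (by omega), h1b, if_neg (by simp)]
      simp [everyOther_cons_drop]
    · have h1 : PySem.Int.mod (s + 1) 2 = 0 := by
        unfold PySem.Int.mod at h ⊢
        rw [Int.fmod_eq_emod] at *; omega
      have hb : (PySem.Int.mod s 2 == 0) = false := beq_eq_false_iff_ne.mpr h
      have h1b : (PySem.Int.mod (s + 1) 2 == 0) = true := beq_iff_eq.mpr h1
      rw [hb, if_neg (by simp), ih (s + 1) _ _ (by omega), h1b, if_pos rfl]
      simp [everyOther_cons_drop]

theorem process_usernames_eq (lines : List String) :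
    process_usernames lines = (everyOther lines, everyOther (lines.drop 1)) := by
  unfold process_usernames
  have he := PySem.List.enumerate_eq_map_pyRange lines ""
  simp only [PySem.List.len_eq] at he
  have : (PySem.List.pyRange 0 (lines.length : Int) 1).foldl
      (fun (acc : List String × List String) counter =>
        if PySem.Int.mod counter 2 == 0 then (acc.1 ++ [PySem.List.pyGetD lines counter ""], acc.2)
        else (acc.1, acc.2 ++ [PySem.List.pyGetD lines counter ""]))
      ([], [])
      = (PySem.List.enumerate lines 0).foldl
        (fun (acc : List String × List String) jl =>
          if PySem.Int.mod jl.1 2 == 0 then (acc.1 ++ [jl.2], acc.2) else (acc.1, acc.2 ++ [jl.2]))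
        ([], []) := by
    rw [he, List.foldl_map]
  simp only [this]
  rw [foldA_enumerate lines 0 [] [] (by omega)]
  simp [PySem.Int.mod]

-- ===== VERDICT (by name: the statement is the Claim_ definition above) =====
theorem process_usernames_spec : Claim_equal_process_usernames := by
  intro lines _
  unfold Spec_process_usernames process_usernames_alt
  rw [slice?_two, slice?_one_two, process_usernames_eq]
  rfl
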